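-- pv_equiv track=rewrite | github.com/MisterSynergy/deltabot-scripts | deaths_at_wikipedia/deaths_at_wikipedia.py | make_categories_list
-- ===== SOURCE A (Python) =====
-- from typing import Any, Generator, Optional
--
-- def make_categories_list(year:int, prefix:Optional[str]=None, suffix:Optional[str]=None, prefixes:Optional[list[str]]=None, suffixes:Optional[list[str]]=None) -> list[str]:
--     if prefix is not None:
--         if suffix is not None:
--             return [ f'{prefix}{year}{suffix}' ]
--         if suffixes is not None:
--             return [ f'{prefix}{year}{suffix}' for suffix in suffixes ]
--         return [ f'{prefix}{year}' ]
--
--     if prefixes is not None: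
--         if suffix is not None:
--             return [ f'{prefix}{year}{suffix}' for prefix in prefixes ]
--         if suffixes is not None: # this can quickly become messy
--             return [ f'{prefix}{year}{suffix}' for prefix in prefixes for suffix in suffixes ]
--         return [ f'{prefix}{year}' for prefix in prefixes ]
--
--     if suffix is not None:
--         return [ f'{year}{suffix}' ]
--
--     if suffixes is not None:
--         return [ f'{year}{suffix}' for suffix in suffixes ]
--
--     raise RuntimeWarning('No input received to build categories list')
-- ===== SOURCE B (Python) =====
-- def make_categories_list(year, prefix=None, suffix=None, prefixes=None, suffixes=None):
--     if prefix is None and suffix is None and prefixes is None and suffixes is None: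
--         raise RuntimeWarning('No input received to build categories list')
--     plist = [prefix] if prefix is not None else (prefixes if prefixes is not None else [''])
--     slist = [suffix] if suffix is not None else (suffixes if suffixes is not None else [''])
--     return [f'{p}{year}{s}' for p in plist for s in slist]
-- ===== Notes on version B (the rewrite author's own statement) =====
-- stated objective: simpler
-- what changed: Replaces A's 9-branch dispatch by normalizing prefix/prefixes and suffix/suffixes into two lists (scalar wins, default ['']) and returning one uniform product comprehension; the all-None RuntimeWarning case is excluded by Pre_.
import Mathlib
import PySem

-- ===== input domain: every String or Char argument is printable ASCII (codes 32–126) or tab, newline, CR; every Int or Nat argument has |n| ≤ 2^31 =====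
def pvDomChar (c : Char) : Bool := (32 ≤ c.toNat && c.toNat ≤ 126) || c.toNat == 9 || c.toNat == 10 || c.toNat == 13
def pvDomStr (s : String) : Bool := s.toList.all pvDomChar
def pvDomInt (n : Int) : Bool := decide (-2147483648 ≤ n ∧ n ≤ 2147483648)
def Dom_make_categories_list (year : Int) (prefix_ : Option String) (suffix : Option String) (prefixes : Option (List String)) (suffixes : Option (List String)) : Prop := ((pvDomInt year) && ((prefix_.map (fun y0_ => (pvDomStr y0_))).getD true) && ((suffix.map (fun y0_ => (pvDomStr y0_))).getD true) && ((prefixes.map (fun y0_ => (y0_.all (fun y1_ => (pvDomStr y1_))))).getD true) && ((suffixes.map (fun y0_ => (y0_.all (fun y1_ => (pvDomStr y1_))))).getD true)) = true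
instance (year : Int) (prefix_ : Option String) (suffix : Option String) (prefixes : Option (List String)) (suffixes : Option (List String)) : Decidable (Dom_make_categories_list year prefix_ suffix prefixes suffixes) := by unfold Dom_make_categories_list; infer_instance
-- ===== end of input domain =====

-- B replaces A's 9-branch dispatch with normalize-into-two-lists + one product comprehension (objective: simpler).
-- ===== PORT A =====
def make_categories_list (year : Int) (prefix_ : Option String) (suffix : Option String) (prefixes : Option (List String)) (suffixes : Option (List String)) : List String :=
  match prefix_ with
  | some p =>
    match suffix with
    | some s => [p ++ PySem.Int.toStr year ++ s]
    | none =>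
      match suffixes with
      | some ss => ss.map (fun s => p ++ PySem.Int.toStr year ++ s)
      | none => [p ++ PySem.Int.toStr year]
  | none =>
    match prefixes with
    | some ps =>
      match suffix with
      | some s => ps.map (fun p => p ++ PySem.Int.toStr year ++ s)
      | none =>
        match suffixes with
        | some ss => ps.flatMap (fun p => ss.map (fun s => p ++ PySem.Int.toStr year ++ s))
        | none => ps.map (fun p => p ++ PySem.Int.toStr year)
    | none =>
      match suffix with
      | some s => [PySem.Int.toStr year ++ s]
      | none =>
        match suffixes with
        | some ss => ss.map (fun s => PySem.Int.toStr year ++ s)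
        | none => []  -- Python raises RuntimeWarning here; excluded by Pre_

-- ===== PORT B =====
def make_categories_list_alt (year : Int) (prefix_ : Option String) (suffix : Option String) (prefixes : Option (List String)) (suffixes : Option (List String)) : List String :=
  if prefix_ = none ∧ suffix = none ∧ prefixes = none ∧ suffixes = none then
    []  -- Python raises RuntimeWarning here; excluded by Pre_
  else
    let plist := match prefix_ with | some p => [p] | none => prefixes.getD [""]
    let slist := match suffix with | some s => [s] | none => suffixes.getD [""]
    plist.flatMap (fun p => slist.map (fun s => p ++ PySem.Int.toStr year ++ s))

-- ===== PRECONDITION & SPEC =====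
-- Pre_ excludes exactly the all-None call, on which A raises RuntimeWarning (B raises there too).
def Pre_make_categories_list (year : Int) (prefix_ : Option String) (suffix : Option String) (prefixes : Option (List String)) (suffixes : Option (List String)) : Prop :=
  ¬ (prefix_ = none ∧ suffix = none ∧ prefixes = none ∧ suffixes = none)
instance (year : Int) (prefix_ : Option String) (suffix : Option String) (prefixes : Option (List String)) (suffixes : Option (List String)) : Decidable (Pre_make_categories_list year prefix_ suffix prefixes suffixes) := by unfold Pre_make_categories_list; infer_instance
def pvWitness_make_categories_list : Int × Option String × Option String × Option (List String) × Option (List String) := (2020, some "Deaths in ", none, none, none)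

def Spec_make_categories_list (year : Int) (prefix_ : Option String) (suffix : Option String) (prefixes : Option (List String)) (suffixes : Option (List String)) (out : List String) : Prop := out = make_categories_list_alt year prefix_ suffix prefixes suffixes
instance (year : Int) (prefix_ : Option String) (suffix : Option String) (prefixes : Option (List String)) (suffixes : Option (List String)) (out : List String) : Decidable (Spec_make_categories_list year prefix_ suffix prefixes suffixes out) := by unfold Spec_make_categories_list; infer_instance

-- ===== CLAIM (what is proved, stated in full; the proofs are below) =====
def Claim_equal_make_categories_list : Prop := ∀ (year : Int) (prefix_ : Option String) (suffix : Option String) (prefixes : Option (List String)) (suffixes : Option (List String)), Dom_make_categories_list year prefix_ suffix prefixes suffixes → Pre_make_categories_list year prefix_ suffix prefixes suffixes → Spec_make_categories_list year prefix_ suffix prefixes suffixes (make_categories_list year prefix_ suffix prefixes suffixes)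

-- ===== LEMMAS AND PROOFS =====

-- ===== VERDICT (by name: the statement is the Claim_ definition above) =====
lemma pv_flatMap_single (f : String → String) (xs : List String) :
    List.flatMap (fun p => [f p]) xs = xs.map f := by
  induction xs <;> simp_all

theorem make_categories_list_spec : Claim_equal_make_categories_list := by
  intro year prefix_ suffix prefixes suffixes _ hpre
  unfold Spec_make_categories_list make_categories_list make_categories_list_alt
  cases prefix_ <;> cases suffix <;> cases prefixes <;> cases suffixes <;>
    simp_all [Pre_make_categories_list, pv_flatMap_single]
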